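-- pv_equiv track=rewrite | github.com/meraf00/Competitive-Programming | 0135-candy/0135-candy.py | find_decreasing_ranges
-- ===== SOURCE A (Python) =====
-- def find_decreasing_ranges(ratings):
--     ranges = []
--     i = 0
--     while i < len(ratings) - 1:
--         current = ratings[i]
--         next = ratings[i + 1]
--
--         if current > next:
--             j = i
--             for j in range(i + 1, len(ratings)):
--                 if j+1>=len(ratings) or ratings[j] <= ratings[j+1]:
--                     break
--             ranges.append((i, j))
--             i = j+1
--             continue
--         i += 1
--
--     return ranges
-- ===== SOURCE B (Python) =====
-- def find_decreasing_ranges(ratings):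
--     n = len(ratings)
--     desc = [ratings[k] > ratings[k + 1] for k in range(n - 1)]
--     ranges = []
--     start = None
--     for k in range(n - 1):
--         if desc[k]:
--             if start is None:
--                 start = k
--         else:
--             if start is not None:
--                 ranges.append((start, k))
--                 start = None
--     if start is not None:
--         ranges.append((start, n - 1))
--     return ranges
-- ===== Notes on version B (the rewrite author's own statement) =====
-- stated objective: alternative
-- what changed: Replaces A's while-loop with a nested inner for-scan-and-break by a two-phase pass: first mark every descent position ratings[k] > ratings[k+1], then group maximal consecutive runs of marks with a start accumulator, emitting (start, one-past-last-descent).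
import Mathlib
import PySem

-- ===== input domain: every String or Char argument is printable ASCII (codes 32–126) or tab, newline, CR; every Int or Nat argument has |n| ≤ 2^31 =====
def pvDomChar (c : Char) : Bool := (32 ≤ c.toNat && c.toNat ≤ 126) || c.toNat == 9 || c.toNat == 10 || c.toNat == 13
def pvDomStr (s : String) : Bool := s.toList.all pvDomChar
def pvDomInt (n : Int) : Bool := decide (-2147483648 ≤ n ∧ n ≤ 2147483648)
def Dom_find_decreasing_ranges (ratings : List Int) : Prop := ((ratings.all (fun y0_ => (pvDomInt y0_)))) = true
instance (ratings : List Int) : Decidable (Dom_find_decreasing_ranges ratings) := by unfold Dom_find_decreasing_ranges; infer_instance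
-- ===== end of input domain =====

-- B replaces A's while-loop with inner scan-and-break by a two-phase mark-descents-then-group-runs pass (alternative decomposition, same O(n) cost).


-- ===== PORT A =====
-- inner 'for j in range(i+1, len(ratings)): if j+1>=len or ratings[j] <= ratings[j+1]: break'
-- (js is the remaining range, j the current loop variable; returns j after the break / loop end)
def pvAInner (ratings : List Int) (n : Nat) : List Nat → Nat → Nat
  | [], j => j
  | jj :: rest, _ =>
    if jj + 1 ≥ n ∨ ratings.getD jj 0 ≤ ratings.getD (jj + 1) 0 then jj
    else pvAInner ratings n rest jj

-- the outer 'while i < len(ratings) - 1' loop; fuel bounds the iteration count (i strictly increases)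
def pvALoop (ratings : List Int) (n : Nat) : Nat → List (Int × Int) → Nat → List (Int × Int)
  | _, acc, 0 => acc
  | i, acc, fuel + 1 =>
    if i + 1 < n then
      let current := ratings.getD i 0
      let next := ratings.getD (i + 1) 0
      if current > next then
        let j := pvAInner ratings n (List.range' (i + 1) (n - (i + 1))) i
        pvALoop ratings n (j + 1) (acc ++ [((i : Int), (j : Int))]) fuel
      else
        pvALoop ratings n (i + 1) acc fuel
    else acc

def find_decreasing_ranges (ratings : List Int) : List (Int × Int) :=
  pvALoop ratings ratings.length 0 [] ratings.length

-- ===== PORT B =====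
-- one grouping step: k is the next position, state = (ranges so far, start of current run or none)
def pvBStep (desc : List Bool) (st : List (Int × Int) × Option Nat) (k : Nat) :
    List (Int × Int) × Option Nat :=
  if desc.getD k false then
    match st.2 with
    | none => (st.1, some k)
    | some s => (st.1, some s)
  else
    match st.2 with
    | some s => (st.1 ++ [((s : Int), (k : Int))], none)
    | none => (st.1, none)

-- the trailing 'if start is not None: ranges.append((start, n - 1))'
def pvBFin (n : Nat) (st : List (Int × Int) × Option Nat) : List (Int × Int) :=
  match st.2 with
  | some s => st.1 ++ [((s : Int), ((n - 1 : Nat) : Int))]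
  | none => st.1

def find_decreasing_ranges_alt (ratings : List Int) : List (Int × Int) :=
  let n := ratings.length
  let desc := (List.range (n - 1)).map (fun k => decide (ratings.getD k 0 > ratings.getD (k + 1) 0))
  pvBFin n ((List.range (n - 1)).foldl (pvBStep desc) ([], none))

-- ===== PRECONDITION & SPEC =====
def Spec_find_decreasing_ranges (ratings : List Int) (out : List (Int × Int)) : Prop := out = find_decreasing_ranges_alt ratings
instance (ratings : List Int) (out : List (Int × Int)) : Decidable (Spec_find_decreasing_ranges ratings out) := by unfold Spec_find_decreasing_ranges; infer_instance

-- ===== CLAIM (what is proved, stated in full; the proofs are below) =====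
def Claim_equal_find_decreasing_ranges : Prop := ∀ (ratings : List Int), Dom_find_decreasing_ranges ratings → Spec_find_decreasing_ranges ratings (find_decreasing_ranges ratings)

-- ===== LEMMAS AND PROOFS =====

-- where a maximal run of descents starting at k ends (first m ≥ k with m = n-1 or no descent at m)
def pvRunEnd (r : List Int) (n : Nat) (k : Nat) : Nat :=
  if _h : k < n - 1 then
    (if r.getD k 0 > r.getD (k + 1) 0 then pvRunEnd r n (k + 1) else k)
  else k
termination_by n - 1 - k
decreasing_by omega

theorem pvRunEnd_stop_not_lt (r : List Int) (n k : Nat) (h : ¬ k < n - 1) :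
    pvRunEnd r n k = k := by
  rw [pvRunEnd, dif_neg h]

theorem pvRunEnd_stop_not_gt (r : List Int) (n k : Nat) (hk : k < n - 1)
    (h : ¬ r.getD k 0 > r.getD (k + 1) 0) : pvRunEnd r n k = k := by
  rw [pvRunEnd, dif_pos hk, if_neg h]

theorem pvRunEnd_succ (r : List Int) (n k : Nat) (hk : k < n - 1)
    (h : r.getD k 0 > r.getD (k + 1) 0) : pvRunEnd r n k = pvRunEnd r n (k + 1) := by
  conv_lhs => rw [pvRunEnd]
  rw [dif_pos hk, if_pos h]

theorem pvRunEnd_ge (r : List Int) (n k : Nat) : k ≤ pvRunEnd r n k := by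
  unfold pvRunEnd
  split
  · split
    · have := pvRunEnd_ge r n (k + 1); omega
    · exact le_refl k
  · exact le_refl k
termination_by n - 1 - k
decreasing_by omega

theorem pvAInner_eq_runEnd (r : List Int) (n : Nat) :
    ∀ (m k j0 : Nat), k + m = n → 0 < m →
      pvAInner r n (List.range' k m) j0 = pvRunEnd r n k := by
  intro m
  induction m with
  | zero => intro k j0 _ h; omega
  | succ m ih =>
    intro k j0 hkm _
    rw [List.range'_succ]
    unfold pvAInner
    by_cases hc : k + 1 ≥ n ∨ r.getD k 0 ≤ r.getD (k + 1) 0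
    · rw [if_pos hc]
      rcases hc with h | h
      · exact (pvRunEnd_stop_not_lt r n k (by omega)).symm
      · by_cases hk : k < n - 1
        · exact (pvRunEnd_stop_not_gt r n k hk (by omega)).symm
        · exact (pvRunEnd_stop_not_lt r n k hk).symm
    · rw [if_neg hc]
      push Not at hc
      obtain ⟨h1, h2⟩ := hc
      have hm : 0 < m := by omega
      rw [ih (k + 1) k (by omega) hm]
      exact (pvRunEnd_succ r n k (by omega) (by omega)).symm

theorem pvDesc_getD (r : List Int) (n k : Nat) (hk : k < n) :
    ((List.range n).map (fun k => decide (r.getD k 0 > r.getD (k + 1) 0)))[k]?.getD false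
      = decide (r.getD k 0 > r.getD (k + 1) 0) := by
  rw [List.getElem?_map, List.getElem?_range hk]
  rfl

-- B's fold through a run that started at s: it emits (s, runEnd) and resumes with no open run
theorem pvB_run (r : List Int) (n : Nat) (hn : n = r.length)
    (desc : List Bool)
    (hdesc : desc = (List.range (n - 1)).map (fun k => decide (r.getD k 0 > r.getD (k + 1) 0))) :
    ∀ (m k : Nat) (s : Nat) (acc : List (Int × Int)), n - 1 - k = m → k ≤ n - 1 →
      pvBFin n ((List.range' k (n - 1 - k)).foldl (pvBStep desc) (acc, some s))
        = pvBFin n ((List.range' (pvRunEnd r n k + 1) (n - 1 - (pvRunEnd r n k + 1))).foldl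
            (pvBStep desc) (acc ++ [((s : Int), ((pvRunEnd r n k : Nat) : Int))], none)) := by
  intro m
  induction m with
  | zero =>
    intro k s acc hm hk
    have hk' : k = n - 1 := by omega
    rw [pvRunEnd_stop_not_lt r n k (by omega)]
    have h0 : n - 1 - k = 0 := by omega
    have h1 : n - 1 - (k + 1) = 0 := by omega
    rw [h0, h1]
    simp [pvBFin, hk']
  | succ m ih =>
    intro k s acc hm hk
    have hklt : k < n - 1 := by omega
    have hrange : List.range' k (n - 1 - k) = k :: List.range' (k + 1) (n - 1 - (k + 1)) := by
      have : n - 1 - k = (n - 1 - (k + 1)) + 1 := by omega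
      rw [this, List.range'_succ]
    rw [hrange, List.foldl_cons]
    have hd : desc[k]?.getD false = decide (r.getD k 0 > r.getD (k + 1) 0) := by
      rw [hdesc]; exact pvDesc_getD r (n - 1) k hklt
    by_cases hc : r.getD k 0 > r.getD (k + 1) 0
    · have hstep : pvBStep desc (acc, some s) k = (acc, some s) := by
        simp [pvBStep, hd]; simp only [List.getD_eq_getElem?_getD] at hc; omega
      rw [hstep, pvRunEnd_succ r n k hklt hc]
      exact ih (k + 1) s acc (by omega) (by omega)
    · have hstep : pvBStep desc (acc, some s) k = (acc ++ [((s : Int), (k : Int))], none) := by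
        simp [pvBStep, hd]; simp only [List.getD_eq_getElem?_getD] at hc; omega
      rw [hstep, pvRunEnd_stop_not_gt r n k hklt hc]

-- the main correspondence: A's while-loop with enough fuel equals B's grouped fold
theorem pvMain (r : List Int) (n : Nat) (hn : n = r.length)
    (desc : List Bool)
    (hdesc : desc = (List.range (n - 1)).map (fun k => decide (r.getD k 0 > r.getD (k + 1) 0))) :
    ∀ (fuel i : Nat) (acc : List (Int × Int)), n - 1 ≤ fuel + i →
      pvALoop r n i acc fuel
        = pvBFin n ((List.range' i (n - 1 - i)).foldl (pvBStep desc) (acc, none)) := by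
  intro fuel
  induction fuel with
  | zero =>
    intro i acc hf
    have h0 : n - 1 - i = 0 := by omega
    rw [h0]
    simp [pvALoop, pvBFin]
  | succ fuel ih =>
    intro i acc hf
    by_cases hi : i + 1 < n
    · have hilt : i < n - 1 := by omega
      have hrange : List.range' i (n - 1 - i) = i :: List.range' (i + 1) (n - 1 - (i + 1)) := by
        have : n - 1 - i = (n - 1 - (i + 1)) + 1 := by omega
        rw [this, List.range'_succ]
      have hd : desc[i]?.getD false = decide (r.getD i 0 > r.getD (i + 1) 0) := by
        rw [hdesc]; exact pvDesc_getD r (n - 1) i hilt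
      by_cases hc : r.getD i 0 > r.getD (i + 1) 0
      · have hj : pvAInner r n (List.range' (i + 1) (n - (i + 1))) i = pvRunEnd r n (i + 1) :=
          pvAInner_eq_runEnd r n (n - (i + 1)) (i + 1) i (by omega) (by omega)
        have hA : pvALoop r n i acc (fuel + 1)
            = pvALoop r n (pvRunEnd r n (i + 1) + 1)
                (acc ++ [((i : Int), ((pvRunEnd r n (i + 1) : Nat) : Int))]) fuel := by
          show (if i + 1 < n then _ else acc) = _
          rw [if_pos hi, if_pos hc, hj]
        rw [hA]
        have hge : i + 1 ≤ pvRunEnd r n (i + 1) := pvRunEnd_ge r n (i + 1)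
        rw [ih (pvRunEnd r n (i + 1) + 1) _ (by omega)]
        rw [hrange, List.foldl_cons]
        have hstep : pvBStep desc (acc, none) i = (acc, some i) := by
          simp [pvBStep, hd]; simp only [List.getD_eq_getElem?_getD] at hc; omega
        rw [hstep]
        exact (pvB_run r n hn desc hdesc (n - 1 - (i + 1)) (i + 1) i acc rfl (by omega)).symm
      · have hA : pvALoop r n i acc (fuel + 1) = pvALoop r n (i + 1) acc fuel := by
          show (if i + 1 < n then _ else acc) = _
          rw [if_pos hi, if_neg hc]
        rw [hA, ih (i + 1) acc (by omega), hrange, List.foldl_cons]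
        have hstep : pvBStep desc (acc, none) i = (acc, none) := by
          simp [pvBStep, hd]; simp only [List.getD_eq_getElem?_getD] at hc; omega
        rw [hstep]
    · have hA : pvALoop r n i acc (fuel + 1) = acc := by
        show (if i + 1 < n then _ else acc) = acc
        rw [if_neg hi]
      have h0 : n - 1 - i = 0 := by omega
      rw [hA, h0]
      simp [pvBFin]

-- ===== VERDICT (by name: the statement is the Claim_ definition above) =====
theorem find_decreasing_ranges_spec : Claim_equal_find_decreasing_ranges := by
  intro r _
  unfold Spec_find_decreasing_ranges find_decreasing_ranges find_decreasing_ranges_alt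
  rw [pvMain r r.length rfl _ rfl r.length 0 [] (by omega)]
  simp [List.range_eq_range']
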